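-- pv_equiv track=rewrite | github.com/gabor00/Szakdoga2025 | apps/deployment-engine/git_watcher.py | _get_changes_from_release_body
-- ===== SOURCE A (Python) =====
-- from typing import List, Dict, Optional
--
-- SERVICES = ["m1", "m2", "m3", "dashboard", "deployment-engine"]
--
-- def _get_changes_from_release_body(body: str) -> Dict[str, bool]:
--     """Kinyeri a változásokat a release leírásából"""
--     changes = {service: False for service in SERVICES}
--
--     # Feltételezzük, hogy a release body tartalmazza a változásokat
--     # Például: "Changes: m1, m2" formátumban
--     if "Changes:" in body:
--         changes_part = body.split("Changes:")[1].strip()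
--         changed_services = [s.strip() for s in changes_part.split(",")]
--
--         for service in changed_services:
--             if service in changes:
--                 changes[service] = True
--
--     return changes
-- ===== SOURCE B (Python) =====
-- from typing import List, Dict, Optional
--
-- SERVICES = ["m1", "m2", "m3", "dashboard", "deployment-engine"]
--
-- def _get_changes_from_release_body(body: str) -> Dict[str, bool]:
--     """Kinyeri a változásokat a release leírásából"""
--     if "Changes:" not in body:
--         return {service: False for service in SERVICES}
--     changes_part = body.split("Changes:")[1].strip()
--     changed = {s.strip() for s in changes_part.split(",")}
--     return {service: service in changed for service in SERVICES}
-- ===== Notes on version B (the rewrite author's own statement) =====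
-- stated objective: simpler
-- what changed: Instead of initialising an all-False dict and mutating entries while looping over the parsed tokens, B parses the tokens into a set once and builds the dict directly in one comprehension over SERVICES testing set membership; no mutation, early return when 'Changes:' is absent.
import Mathlib
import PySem

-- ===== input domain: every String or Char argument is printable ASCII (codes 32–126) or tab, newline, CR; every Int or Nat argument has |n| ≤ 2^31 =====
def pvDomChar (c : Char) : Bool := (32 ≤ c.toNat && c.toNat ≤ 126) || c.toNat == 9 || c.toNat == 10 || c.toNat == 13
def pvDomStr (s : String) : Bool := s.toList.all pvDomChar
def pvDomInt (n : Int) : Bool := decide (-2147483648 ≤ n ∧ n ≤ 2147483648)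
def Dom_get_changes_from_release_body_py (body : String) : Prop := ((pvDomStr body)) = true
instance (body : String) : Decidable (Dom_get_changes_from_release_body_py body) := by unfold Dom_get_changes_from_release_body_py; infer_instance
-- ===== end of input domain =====

-- B replaces A's mutate-a-prefilled-dict loop over parsed tokens by a single comprehension over
-- SERVICES testing membership in the parsed token set (objective: simpler; return value only).

-- ===== PORT A =====
def pvServices : List String := ["m1", "m2", "m3", "dashboard", "deployment-engine"]

def get_changes_from_release_body_py (body : String) : List (String × Bool) :=
  -- changes = {service: False for service in SERVICES}
  let changes : PySem.Dict String Bool :=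
    pvServices.foldl (fun d s => d.insert s false) PySem.Dict.empty
  let changes :=
    if PySem.Str.isIn "Changes:" body then
      -- split? is `some` since the separator is nonempty; pyGetD's default is never used
      -- because "Changes:" occurs in body, so the split has at least two pieces.
      let changes_part :=
        PySem.Str.strip (PySem.List.pyGetD ((PySem.Str.split? body "Changes:").getD []) 1 "")
      let changed_services := (PySem.Str.split? changes_part ",").getD [] |>.map PySem.Str.strip
      changed_services.foldl (fun d s => if d.contains s then d.insert s true else d) changes
    else changes
  changes.items

-- ===== PORT B =====
def get_changes_from_release_body_py_alt (body : String) : List (String × Bool) :=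
  if PySem.Str.isIn "Changes:" body then
    let changes_part :=
      PySem.Str.strip (PySem.List.pyGetD ((PySem.Str.split? body "Changes:").getD []) 1 "")
    let changed : PySem.Set String :=
      PySem.Set.ofList (((PySem.Str.split? changes_part ",").getD []).map PySem.Str.strip)
    pvServices.map (fun s => (s, changed.contains s))
  else
    pvServices.map (fun s => (s, false))

-- ===== PRECONDITION & SPEC =====
def Spec_get_changes_from_release_body_py (body : String) (out : List (String × Bool)) : Prop := out = get_changes_from_release_body_py_alt body
instance (body : String) (out : List (String × Bool)) : Decidable (Spec_get_changes_from_release_body_py body out) := by unfold Spec_get_changes_from_release_body_py; infer_instance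

-- ===== CLAIM (what is proved, stated in full; the proofs are below) =====
def Claim_equal_get_changes_from_release_body_py : Prop := ∀ (body : String), Dom_get_changes_from_release_body_py body → Spec_get_changes_from_release_body_py body (get_changes_from_release_body_py body)

-- ===== LEMMAS AND PROOFS =====

-- A's marking loop over an arbitrary token list, tracked by the five entry booleans.
theorem pv_loop5 (l : List String) (b1 b2 b3 b4 b5 : Bool) :
    (l.foldl (fun (d : PySem.Dict String Bool) s => if d.contains s then d.insert s true else d)
      (PySem.Dict.mk [("m1", b1), ("m2", b2), ("m3", b3), ("dashboard", b4), ("deployment-engine", b5)])).items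
    = [("m1", b1 || l.contains "m1"), ("m2", b2 || l.contains "m2"), ("m3", b3 || l.contains "m3"),
       ("dashboard", b4 || l.contains "dashboard"), ("deployment-engine", b5 || l.contains "deployment-engine")] := by
  induction l generalizing b1 b2 b3 b4 b5 with
  | nil => simp
  | cons t l ih =>
    by_cases h1 : t = "m1"
    · subst h1; rw [List.foldl_cons]; simpa [PySem.Dict.insert] using ih true b2 b3 b4 b5
    by_cases h2 : t = "m2"
    · subst h2; rw [List.foldl_cons]; simpa [PySem.Dict.insert] using ih b1 true b3 b4 b5
    by_cases h3 : t = "m3"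
    · subst h3; rw [List.foldl_cons]; simpa [PySem.Dict.insert] using ih b1 b2 true b4 b5
    by_cases h4 : t = "dashboard"
    · subst h4; rw [List.foldl_cons]; simpa [PySem.Dict.insert] using ih b1 b2 b3 true b5
    by_cases h5 : t = "deployment-engine"
    · subst h5; rw [List.foldl_cons]; simpa [PySem.Dict.insert] using ih b1 b2 b3 b4 true
    · have hc : (PySem.Dict.mk [("m1", b1), ("m2", b2), ("m3", b3), ("dashboard", b4),
          ("deployment-engine", b5)]).contains t = false := by
        simp [PySem.Dict.contains_mk]
        exact ⟨fun h => h1 h.symm, fun h => h2 h.symm, fun h => h3 h.symm,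
               fun h => h4 h.symm, fun h => h5 h.symm⟩
      simp [List.foldl_cons, hc, ih, Ne.symm h1, Ne.symm h2, Ne.symm h3, Ne.symm h4, Ne.symm h5]

-- ===== VERDICT (by name: the statement is the Claim_ definition above) =====
theorem get_changes_from_release_body_py_spec : Claim_equal_get_changes_from_release_body_py := by
  intro body _
  unfold Spec_get_changes_from_release_body_py
  unfold get_changes_from_release_body_py get_changes_from_release_body_py_alt
  by_cases h : PySem.Str.isIn "Changes:" body = true
  · simp only [h, if_true]
    have hinit : pvServices.foldl (fun (d : PySem.Dict String Bool) s => d.insert s false) PySem.Dict.empty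
        = PySem.Dict.mk [("m1", false), ("m2", false), ("m3", false), ("dashboard", false),
            ("deployment-engine", false)] := by decide
    rw [hinit, pv_loop5]
    simp [pvServices]
  · have hf : PySem.Str.isIn "Changes:" body = false := by simpa using h
    rw [hf]
    simp only [Bool.false_eq_true, if_false]
    decide
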